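-- pv_equiv track=rewrite | github.com/dessertivore/advent-of-code-2023 | day-4/day_4.py | day4
-- ===== SOURCE A (Python) =====
-- def day4(array: list, winning: int) -> int:
--     """
--     Input list of games. 'Winning' should be the number of cards in a winning set so that
--     the function knows what indices to be searching through.
--     """
--     total = 0
--     for z in array:
--         counter = 0
--         winning_list = z[1 : (winning + 1)]
--         my_list = z[(winning + 1) :]
--         for x in winning_list:
--             for y in my_list:
--                 if x == y:
--                     counter += 1
--         total += int(2 ** (counter - 1))
--     return total
-- ===== SOURCE B (Python) =====
-- def day4(array: list, winning: int) -> int: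
--     total = 0
--     for z in array:
--         w = sorted(z[1:winning + 1])
--         m = sorted(z[winning + 1:])
--         counter = 0
--         i = j = 0
--         while i < len(w) and j < len(m):
--             if w[i] < m[j]:
--                 i += 1
--             elif m[j] < w[i]:
--                 j += 1
--             else:
--                 v = w[i]
--                 a = 0
--                 while i < len(w) and w[i] == v:
--                     i += 1
--                     a += 1
--                 b = 0
--                 while j < len(m) and m[j] == v:
--                     j += 1
--                     b += 1
--                 counter += a * b
--         total += int(2 ** (counter - 1))
--     return total
-- ===== Notes on version B (the rewrite author's own statement) =====
-- stated objective: alternative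
-- what changed: Per game, B sorts the winning and owned slices and counts matching pairs with a single two-pointer merge that adds the product of equal-value run lengths, replacing A's nested scan of every winning number against every owned number.
import Mathlib
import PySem

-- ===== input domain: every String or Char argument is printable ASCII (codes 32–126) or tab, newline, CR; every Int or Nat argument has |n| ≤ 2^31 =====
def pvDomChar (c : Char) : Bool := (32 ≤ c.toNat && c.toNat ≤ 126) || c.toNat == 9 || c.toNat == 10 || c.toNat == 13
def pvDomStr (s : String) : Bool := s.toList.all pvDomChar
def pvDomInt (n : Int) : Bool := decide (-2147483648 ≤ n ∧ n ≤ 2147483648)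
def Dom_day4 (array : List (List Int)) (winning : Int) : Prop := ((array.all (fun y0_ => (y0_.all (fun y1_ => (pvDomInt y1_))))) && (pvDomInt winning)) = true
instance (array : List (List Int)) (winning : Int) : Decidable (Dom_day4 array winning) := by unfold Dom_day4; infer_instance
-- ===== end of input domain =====

-- B sorts both slices and counts matching pairs by a two-pointer merge over run lengths
-- (adding a*b per common value) instead of A's nested scan; same return value.

-- ===== PORT A =====
def day4 (array : List (List Int)) (winning : Int) : Int :=
  array.foldl (fun total z =>
    let winning_list := PySem.List.slice z (some 1) (some (winning + 1))
    let my_list := PySem.List.slice z (some (winning + 1)) none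
    let counter := winning_list.foldl (fun c x =>
        my_list.foldl (fun c y => if x == y then c + 1 else c) c) (0 : Int)
    -- int(2 ** (counter - 1)): counter ≥ 0 always; counter = 0 gives int(0.5) = 0
    total + (if counter = 0 then 0 else 2 ^ (counter - 1).toNat)) 0

-- ===== PORT B =====
-- the inner 'while … == v' loops: length of the leading run of v, and the remaining list
def runSplit (v : Int) : List Int → Int × List Int
  | [] => (0, [])
  | x :: xs => if x = v then let p := runSplit v xs; (p.1 + 1, p.2) else (0, x :: xs)

theorem runSplit_len (v : Int) (l : List Int) : (runSplit v l).2.length ≤ l.length := by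
  induction l with
  | nil => simp [runSplit]
  | cons x xs ih =>
    by_cases h : x = v
    · simp [runSplit, h]; omega
    · simp [runSplit, h]

-- the outer while loop: two-pointer merge of the two sorted lists
def mergeCount : List Int → List Int → Int
  | [], _ => 0
  | _ :: _, [] => 0
  | x :: xs, y :: ys =>
    if x < y then mergeCount xs (y :: ys)
    else if y < x then mergeCount (x :: xs) ys
    else
      let p := runSplit x (x :: xs)
      let q := runSplit x (y :: ys)
      p.1 * q.1 + mergeCount p.2 q.2
termination_by l₁ l₂ => l₁.length + l₂.length
decreasing_by
  · simp
  · simp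
  · have h1 := runSplit_len x xs
    have h2 := runSplit_len x ys
    have hxy : x = y := by omega
    have hx : runSplit x (x :: xs) = ((runSplit x xs).1 + 1, (runSplit x xs).2) := by
      simp [runSplit]
    have hy : runSplit x (y :: ys) = ((runSplit x ys).1 + 1, (runSplit x ys).2) := by
      simp [runSplit, hxy]
    simp [hx, hy]; omega

def day4_alt (array : List (List Int)) (winning : Int) : Int :=
  array.foldl (fun total z =>
    let w := PySem.List.sorted (PySem.List.slice z (some 1) (some (winning + 1))) (fun x => x) false
    let m := PySem.List.sorted (PySem.List.slice z (some (winning + 1)) none) (fun x => x) false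
    let counter := mergeCount w m
    total + (if counter = 0 then 0 else 2 ^ (counter - 1).toNat)) 0

-- ===== PRECONDITION & SPEC =====
def Spec_day4 (array : List (List Int)) (winning : Int) (out : Int) : Prop := out = day4_alt array winning
instance (array : List (List Int)) (winning : Int) (out : Int) : Decidable (Spec_day4 array winning out) := by unfold Spec_day4; infer_instance

-- ===== CLAIM (what is proved, stated in full; the proofs are below) =====
def Claim_equal_day4 : Prop := ∀ (array : List (List Int)) (winning : Int), Dom_day4 array winning → Spec_day4 array winning (day4 array winning)

-- ===== LEMMAS AND PROOFS =====

theorem inner_count (ml : List Int) (x : Int) (c : Int) :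
    ml.foldl (fun c y => if x == y then c + 1 else c) c = c + ml.count x := by
  induction ml generalizing c with
  | nil => simp
  | cons h t ih =>
    simp only [List.foldl, List.count_cons, ih]
    by_cases hx : x = h
    · simp [hx]; ring
    · simp [hx, Ne.symm hx, beq_iff_eq]

-- A's counter is the sum, over the winning list, of multiplicities in the owned list
theorem a_counter (wl ml : List Int) (c : Int) :
    wl.foldl (fun c x => ml.foldl (fun c y => if x == y then c + 1 else c) c) c
      = c + (wl.map (fun x => (ml.count x : Int))).sum := by
  induction wl generalizing c with
  | nil => simp
  | cons h t ih =>
    simp only [List.foldl, List.map, List.sum_cons, inner_count, PySem.List.foldl_add]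
    ring

theorem runSplit_spec (v : Int) (l : List Int)
    (hl : l.Pairwise (· ≤ ·)) (hv : ∀ z ∈ l, v ≤ z) :
    l = List.replicate (runSplit v l).1.toNat v ++ (runSplit v l).2 ∧
    (runSplit v l).1 = (l.count v : Int) ∧
    (runSplit v l).2.Pairwise (· ≤ ·) ∧
    (∀ z ∈ (runSplit v l).2, v < z) := by
  induction l with
  | nil => simp [runSplit]
  | cons h t ih =>
    rcases List.pairwise_cons.mp hl with ⟨hle, ht⟩
    by_cases hh : h = v
    · subst hh
      obtain ⟨e1, e2, e3, e4⟩ := ih ht hle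
      have hr : runSplit h (h :: t) = ((runSplit h t).1 + 1, (runSplit h t).2) := by
        simp [runSplit]
    
      have hnn : 0 ≤ (runSplit h t).1 := by rw [e2]; positivity
      have hn : ((runSplit h t).1 + 1).toNat = (runSplit h t).1.toNat + 1 := by omega
      refine ⟨?_, ?_, by rw [hr]; exact e3, by rw [hr]; exact e4⟩
      · rw [hr]; simp only [hn, List.replicate_succ, List.cons_append]
        exact congrArg (h :: ·) e1
      · rw [hr]; simp [e2]
    · have hvh : v < h := lt_of_le_of_ne (hv h (by simp)) (Ne.symm hh)
      have hr : runSplit v (h :: t) = (0, h :: t) := by simp [runSplit, hh]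
      have hnotmem : v ∉ h :: t := by
        intro hmem
        rcases List.mem_cons.mp hmem with heq | hmem
        · exact hh heq.symm
        · have := hle v hmem; omega
      refine ⟨by simp [hr], ?_, by rw [hr]; exact hl, ?_⟩
      · rw [hr]; simp [List.count_eq_zero.mpr hnotmem]
      · intro z hz
        rw [hr] at hz
        rcases List.mem_cons.mp hz with rfl | hz
        · exact hvh
        · exact lt_of_lt_of_le hvh (hle z hz)

theorem merge_sum (n : Nat) : ∀ s t : List Int, s.length + t.length ≤ n →
    s.Pairwise (· ≤ ·) → t.Pairwise (· ≤ ·) →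
    mergeCount s t = (s.map (fun x => (t.count x : Int))).sum := by
  induction n with
  | zero =>
    intro s t hlen _ _
    have hs : s = [] := by cases s <;> simp_all
    subst hs; simp [mergeCount]
  | succ n ih =>
    intro s t hlen hs ht
    match s, t with
    | [], t => simp [mergeCount]
    | x :: xs, [] => simp [mergeCount]
    | x :: xs, y :: ys =>
      rcases List.pairwise_cons.mp hs with ⟨hxle, hxs⟩
      rcases List.pairwise_cons.mp ht with ⟨hyle, hys⟩
      simp only [List.length_cons] at hlen
      by_cases h1 : x < y
      · rw [mergeCount, if_pos h1]
        have hxnot : x ∉ y :: ys := by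
          intro hmem
          rcases List.mem_cons.mp hmem with rfl | hmem
          · exact absurd h1 (lt_irrefl x)
          · have := hyle x hmem; omega
        rw [ih xs (y :: ys) (by simp; omega) hxs ht]
        simp [List.count_eq_zero.mpr hxnot]
      · by_cases h2 : y < x
        · rw [mergeCount, if_neg h1, if_pos h2]
          have hmapeq : (x :: xs).map (fun z => ((y :: ys).count z : Int))
              = (x :: xs).map (fun z => (ys.count z : Int)) := by
            apply List.map_congr_left
            intro z hz
            have hxz : x ≤ z := by
              rcases List.mem_cons.mp hz with rfl | hz
              · exact le_refl z
              · exact hxle z hz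
            have hzy : y ≠ z := by omega
            simp [hzy]
          rw [hmapeq, ih (x :: xs) ys (by simp; omega) hs hys]
        · have hxy : x = y := le_antisymm (not_lt.mp h2) (not_lt.mp h1)
          subst hxy
          rw [mergeCount, if_neg h1, if_neg h2]
          show (runSplit x (x :: xs)).1 * (runSplit x (x :: ys)).1
              + mergeCount (runSplit x (x :: xs)).2 (runSplit x (x :: ys)).2
            = ((x :: xs).map (fun z => ((x :: ys).count z : Int))).sum
          have hvs : ∀ z ∈ x :: xs, x ≤ z := by
            intro z hz
            rcases List.mem_cons.mp hz with rfl | hz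
            · exact le_refl z
            · exact hxle z hz
          have hvt : ∀ z ∈ x :: ys, x ≤ z := by
            intro z hz
            rcases List.mem_cons.mp hz with rfl | hz
            · exact le_refl z
            · exact hyle z hz
          obtain ⟨e1, e2, e3, e4⟩ := runSplit_spec x (x :: xs) hs hvs
          obtain ⟨f1, f2, f3, f4⟩ := runSplit_spec x (x :: ys) ht hvt
          -- lengths for the IH
          have hcx : 0 < (x :: xs).count x := List.count_pos_iff.mpr (by simp)
          have hcy : 0 < (x :: ys).count x := List.count_pos_iff.mpr (by simp)
          have hlen1 := congrArg List.length e1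
          have hlen2 := congrArg List.length f1
          simp at hlen1 hlen2
          have hih := ih (runSplit x (x :: xs)).2 (runSplit x (x :: ys)).2
            (by omega) e3 f3
          rw [hih]
          -- rewrite the RHS sum using the replicate ++ rest decomposition
          conv_rhs => rw [e1]
          rw [List.map_append, List.sum_append, List.map_replicate, List.sum_replicate]
          have hcnt : ((x :: ys).count x : Int) = (runSplit x (x :: ys)).1 := f2.symm
          have hrest : ((runSplit x (x :: xs)).2.map (fun z => ((x :: ys).count z : Int)))
              = ((runSplit x (x :: xs)).2.map (fun z => ((runSplit x (x :: ys)).2.count z : Int))) := by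
            apply List.map_congr_left
            intro z hz
            have hxz : x < z := e4 z hz
            conv_lhs => rw [f1]
            rw [List.count_append, List.count_replicate]
            simp
            omega
          rw [hrest]
          have h0 : ((runSplit x (x :: xs)).1.toNat : Int) = (runSplit x (x :: xs)).1 := by
            have : (0 : Int) ≤ (runSplit x (x :: xs)).1 := by rw [e2]; positivity
            omega
          have hsm : (runSplit x (x :: xs)).1.toNat • ((x :: ys).count x : Int)
              = (runSplit x (x :: xs)).1 * (runSplit x (x :: ys)).1 := by
            rw [nsmul_eq_mul, h0, hcnt]
          rw [hsm]
    
theorem sum_count_perm (wl ml sw sm : List Int) (hps : sw.Perm wl) (hpm : sm.Perm ml) :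
    (sw.map (fun x => (sm.count x : Int))).sum = (wl.map (fun x => (ml.count x : Int))).sum := by
  have hfun : (fun x => (sm.count x : Int)) = fun x => (ml.count x : Int) := by
    funext x; exact_mod_cast hpm.count_eq x
  rw [hfun]
  exact (hps.map _).sum_eq

theorem per_game (winning : Int) (z : List Int) :
    (PySem.List.slice z (some 1) (some (winning + 1))).foldl (fun c x =>
        (PySem.List.slice z (some (winning + 1)) none).foldl
          (fun c y => if x == y then c + 1 else c) c) (0 : Int)
    = mergeCount
        (PySem.List.sorted (PySem.List.slice z (some 1) (some (winning + 1))) (fun x => x) false)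
        (PySem.List.sorted (PySem.List.slice z (some (winning + 1)) none) (fun x => x) false) := by
  generalize PySem.List.slice z (some 1) (some (winning + 1)) = wl
  generalize PySem.List.slice z (some (winning + 1)) none = ml
  rw [a_counter]
  have hsw : (PySem.List.sorted wl (fun x => x) false).Pairwise (· ≤ ·) := by
    have := PySem.List.sorted_pairwise wl (fun x : Int => x)
    simpa using this
  have hsm : (PySem.List.sorted ml (fun x => x) false).Pairwise (· ≤ ·) := by
    have := PySem.List.sorted_pairwise ml (fun x : Int => x)
    simpa using this
  rw [merge_sum _ _ _ le_rfl hsw hsm,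
    sum_count_perm wl ml _ _ (PySem.List.sorted_perm wl _ _) (PySem.List.sorted_perm ml _ _)]
  ring

-- ===== VERDICT (by name: the statement is the Claim_ definition above) =====
theorem day4_spec : Claim_equal_day4 := by
  intro array winning _
  unfold Spec_day4 day4 day4_alt
  suffices h : ∀ t0 : Int,
      array.foldl (fun total z =>
        let winning_list := PySem.List.slice z (some 1) (some (winning + 1))
        let my_list := PySem.List.slice z (some (winning + 1)) none
        let counter := winning_list.foldl (fun c x =>
            my_list.foldl (fun c y => if x == y then c + 1 else c) c) (0 : Int)
        total + (if counter = 0 then 0 else 2 ^ (counter - 1).toNat)) t0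
      = array.foldl (fun total z =>
        let w := PySem.List.sorted (PySem.List.slice z (some 1) (some (winning + 1))) (fun x => x) false
        let m := PySem.List.sorted (PySem.List.slice z (some (winning + 1)) none) (fun x => x) false
        let counter := mergeCount w m
        total + (if counter = 0 then 0 else 2 ^ (counter - 1).toNat)) t0 from h 0
  induction array with
  | nil => intro t0; rfl
  | cons z t _ => intro t0; simp only [List.foldl, per_game]
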